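-- pv_equiv track=rewrite | github.com/gboudrias/Euler-Python | eProb364.py | getValidSeats
-- ===== SOURCE A (Python) =====
-- def getValidSeats(row):
--     if isRowFull(row):
--         return []
--
--     listOfSeats = []
--
--     ''' If there is any seat whose adjacent seat(s) are not occupied take such a seat.'''
--     for i in range(0,len(row)):
--         if row[i] == 0:
--             ''' Obviously, taken seat is invalid '''
--             if i == 0:
--                 '''Edge case left '''
--                 if row[i + 1] == 0:
--                     listOfSeats.append(i)
--             elif i == len(row) -1:
--                 ''' Edge case right '''
--                 if row[i - 1] == 0:
--                     listOfSeats.append(i)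
--             else:
--                 ''' Not an edge case '''
--                 if row[i - 1] == 0 and row[i + 1] == 0:
--                     listOfSeats.append(i)
--
--     if len(listOfSeats) > 0:
--         return listOfSeats
--
--     ''' If there is no such seat and there is any seat for which only one adjacent seat is occupied take such a seat. '''
--     for i in range(0,len(row)):
--         if row[i] == 0:
--             ''' Obviously, taken seat is invalid '''
--             if i == 0:
--                 '''Edge case left, left is always open '''
--                 listOfSeats.append(i)
--             elif i == len(row) -1:
--                 ''' Edge case right, right is always open '''
--                 listOfSeats.append(i)
--             else:
--                 ''' Not an edge case '''
--                 if row[i - 1] == 0 or row[i + 1] == 0: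
--                     listOfSeats.append(i)
--
--     if len(listOfSeats) > 0:
--         return listOfSeats
--
--     for i in range(0,len(row)):
--         if row[i] == 0:
--             listOfSeats.append(i)
--
--     return listOfSeats
--
-- def isRowFull(row):
--     for i in row:
--         if i == 0:
--             return False
--
--     return True
-- ===== SOURCE B (Python) =====
-- def getValidSeats(row):
--     # One pass: occupied-neighbor count per free seat, then keep the seats attaining the minimum.
--     pairs = []
--     for i in range(len(row)):
--         if row[i] != 0:
--             continue
--         if i == 0:
--             c = 1 if row[i + 1] != 0 else 0
--         elif i == len(row) - 1:
--             c = 1 if row[i - 1] != 0 else 0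
--         else:
--             c = (1 if row[i - 1] != 0 else 0) + (1 if row[i + 1] != 0 else 0)
--         pairs.append((i, c))
--     if not pairs:
--         return []
--     m = min(c for _, c in pairs)
--     return [i for i, c in pairs if c == m]
-- ===== Notes on version B (the rewrite author's own statement) =====
-- stated objective: simpler
-- what changed: A's three cascaded filtering passes over the row (both-neighbours-free, then at-most-one-occupied, then any-free) are replaced by a single pass that records each free seat's occupied-neighbour count and then returns the seats attaining the minimum count.
-- outside the precondition, e.g. on getValidSeats([0]): A raises IndexError, B raises IndexError
import Mathlib
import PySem

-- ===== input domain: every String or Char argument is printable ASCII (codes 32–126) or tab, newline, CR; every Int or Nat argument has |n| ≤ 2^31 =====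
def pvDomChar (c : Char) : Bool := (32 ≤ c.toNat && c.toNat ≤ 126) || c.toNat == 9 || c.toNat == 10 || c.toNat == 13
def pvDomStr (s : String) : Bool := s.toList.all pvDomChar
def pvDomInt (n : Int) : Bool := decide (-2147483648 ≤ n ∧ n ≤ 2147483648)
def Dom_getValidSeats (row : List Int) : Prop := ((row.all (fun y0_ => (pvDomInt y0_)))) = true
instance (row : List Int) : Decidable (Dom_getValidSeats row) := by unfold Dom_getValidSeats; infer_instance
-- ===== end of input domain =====

-- B replaces A's three cascaded filtering passes by one pass computing each free seat's
-- occupied-neighbour count followed by a min-and-filter (objective: simpler decomposition).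

-- ===== PORT A =====
-- isRowFull: loop with early return False on a 0, else True
def pvIsRowFull (row : List Int) : Bool :=
  row.foldl (fun full i => if i == 0 then false else full) true

-- condition of A's first pass (both neighbours free); pyGetD default 1 is only
-- reached where Python raises IndexError (row = [0]), which Pre_ excludes
def pvCondA1 (row : List Int) (i : Int) : Bool :=
  if PySem.List.pyGetD row i 1 == 0 then
    if i == 0 then PySem.List.pyGetD row (i + 1) 1 == 0
    else if i == (row.length : Int) - 1 then PySem.List.pyGetD row (i - 1) 1 == 0
    else PySem.List.pyGetD row (i - 1) 1 == 0 && PySem.List.pyGetD row (i + 1) 1 == 0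
  else false

-- condition of A's second pass (at most one occupied neighbour)
def pvCondA2 (row : List Int) (i : Int) : Bool :=
  if PySem.List.pyGetD row i 1 == 0 then
    if i == 0 then true
    else if i == (row.length : Int) - 1 then true
    else PySem.List.pyGetD row (i - 1) 1 == 0 || PySem.List.pyGetD row (i + 1) 1 == 0
  else false

def getValidSeats (row : List Int) : List Int :=
  if pvIsRowFull row then [] else
  let l1 := (PySem.List.pyRange 0 (row.length : Int) 1).foldl
    (fun acc i => if pvCondA1 row i then acc ++ [i] else acc) []
  if l1.length > 0 then l1 else
  let l2 := (PySem.List.pyRange 0 (row.length : Int) 1).foldl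
    (fun acc i => if pvCondA2 row i then acc ++ [i] else acc) []
  if l2.length > 0 then l2 else
  (PySem.List.pyRange 0 (row.length : Int) 1).foldl
    (fun acc i => if PySem.List.pyGetD row i 1 == 0 then acc ++ [i] else acc) []

-- ===== PORT B =====
-- occupied-neighbour count of free seat i; pyGetD default 1 is only reached
-- where Python raises IndexError (row = [0]), which Pre_ excludes
def pvCnt (row : List Int) (i : Int) : Int :=
  if i == 0 then (if PySem.List.pyGetD row (i + 1) 1 != 0 then 1 else 0)
  else if i == (row.length : Int) - 1 then (if PySem.List.pyGetD row (i - 1) 1 != 0 then 1 else 0)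
  else (if PySem.List.pyGetD row (i - 1) 1 != 0 then 1 else 0)
       + (if PySem.List.pyGetD row (i + 1) 1 != 0 then 1 else 0)

def getValidSeats_alt (row : List Int) : List Int :=
  let pairs := (PySem.List.pyRange 0 (row.length : Int) 1).foldl
    (fun acc i => if PySem.List.pyGetD row i 1 != 0 then acc
                  else acc ++ [(i, pvCnt row i)]) []
  if pairs.isEmpty then [] else
  let m := (PySem.List.min? (pairs.map Prod.snd) (fun v => v)).getD 0
  (pairs.filter (fun p => p.2 == m)).map Prod.fst

-- ===== PRECONDITION & SPEC =====
-- Pre_ excludes exactly row = [0], on which Python raises IndexError (row[1] on a length-1 row)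
def Pre_getValidSeats (row : List Int) : Prop := row ≠ [0]
instance (row : List Int) : Decidable (Pre_getValidSeats row) := by unfold Pre_getValidSeats; infer_instance
def pvWitness_getValidSeats : List Int := [0, 1, 0]

def Spec_getValidSeats (row : List Int) (out : List Int) : Prop := out = getValidSeats_alt row
instance (row : List Int) (out : List Int) : Decidable (Spec_getValidSeats row out) := by unfold Spec_getValidSeats; infer_instance

-- ===== CLAIM (what is proved, stated in full; the proofs are below) =====
def Claim_equal_getValidSeats : Prop := ∀ (row : List Int), Dom_getValidSeats row → Pre_getValidSeats row → Spec_getValidSeats row (getValidSeats row)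

-- ===== LEMMAS AND PROOFS =====

theorem pvCondA1_eq (row : List Int) (i : Int) :
    pvCondA1 row i = ((PySem.List.pyGetD row i 1 == 0) && (pvCnt row i == 0)) := by
  unfold pvCondA1 pvCnt
  split_ifs <;> simp_all

theorem pvCondA2_eq (row : List Int) (i : Int) :
    pvCondA2 row i = ((PySem.List.pyGetD row i 1 == 0) && decide (pvCnt row i ≤ 1)) := by
  unfold pvCondA2 pvCnt
  split_ifs <;> simp_all

theorem pvCnt_bounds (row : List Int) (i : Int) :
    0 ≤ pvCnt row i ∧ pvCnt row i ≤ 2 := by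
  unfold pvCnt
  split_ifs <;> omega

theorem pvFull_iff (row : List Int) :
    pvIsRowFull row = true ↔
      (PySem.List.pyRange 0 (row.length : Int) 1).filter
        (fun i => PySem.List.pyGetD row i 1 == 0) = [] := by
  unfold pvIsRowFull
  rw [PySem.List.foldl_if_false_eq]
  simp only [Bool.true_and, Bool.not_eq_eq_eq_not, Bool.not_true, List.any_eq_false,
    List.filter_eq_nil_iff]
  constructor
  · intro h i hi
    rw [PySem.List.mem_pyRange_one] at hi
    have := PySem.List.pyGetD_eq_getElem (xs := row) (i := i) (d := 1) hi.1 (by simpa using hi.2)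
    simp [this]
    intro hh
    exact h _ (hh ▸ List.getElem_mem _) rfl
  · intro h x hx
    obtain ⟨j, hj, rfl⟩ := List.mem_iff_getElem.mp hx
    have hmem : ((j : Int)) ∈ PySem.List.pyRange 0 (row.length : Int) 1 := by
      rw [PySem.List.mem_pyRange_one]; constructor <;> omega
    have := h _ hmem
    have hg := PySem.List.pyGetD_eq_getElem (xs := row) (i := (j:Int)) (d := 1)
      (by positivity) (by exact_mod_cast hj)
    simp [hg] at this
    simpa using this

theorem getValidSeats_main (row : List Int) :
    getValidSeats row = getValidSeats_alt row := by
  have hc1 : pvCondA1 row = fun i => (PySem.List.pyGetD row i 1 == 0) && (pvCnt row i == 0) :=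
    funext (pvCondA1_eq row)
  have hc2 : pvCondA2 row = fun i => (PySem.List.pyGetD row i 1 == 0) && decide (pvCnt row i ≤ 1) :=
    funext (pvCondA2_eq row)
  unfold getValidSeats getValidSeats_alt
  simp only [PySem.List.foldl_append_if_eq_filter, List.nil_append, hc1, hc2]
  -- B's accumulation loop builds the (index, count) pairs of the free seats
  have hfun : (fun (acc : List (Int × Int)) i => if PySem.List.pyGetD row i 1 != 0 then acc
                else acc ++ [(i, pvCnt row i)])
      = (fun acc i => if (PySem.List.pyGetD row i 1 == 0) then acc ++ [(i, pvCnt row i)] else acc) := by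
    funext acc i
    by_cases hi : PySem.List.pyGetD row i 1 = 0 <;> simp [hi]
  rw [hfun, PySem.List.foldl_append_if, List.nil_append]
  set R := PySem.List.pyRange 0 (row.length : Int) 1 with hR
  set free : Int → Bool := fun i => PySem.List.pyGetD row i 1 == 0 with hfree
  set F := R.filter free with hF
  by_cases hfull : pvIsRowFull row = true
  · -- no free seat: both return []
    have hFnil : F = [] := (pvFull_iff row).mp hfull
    simp [hfull, hFnil]
  · -- some free seat
    have hFne : F ≠ [] := fun hnil => hfull ((pvFull_iff row).mpr hnil)
    simp only [hfull, List.map_map]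
    have hvals : F.map (Prod.snd ∘ fun i => (i, pvCnt row i)) = F.map (fun i => pvCnt row i) := by
      simp [Function.comp]
    have hne' : (F.map (fun i => (i, pvCnt row i))).isEmpty = false := by
      simp [List.isEmpty_eq_false_iff, hFne]
    simp only [hne', Bool.false_eq_true, if_false, hvals]
    obtain ⟨mv, hmv⟩ : ∃ mv, PySem.List.min? (F.map (fun i => pvCnt row i)) (fun v => v) = some mv := by
      cases hm : PySem.List.min? (F.map (fun i => pvCnt row i)) (fun v => v) with
      | none => exact absurd (by simpa [PySem.List.min?_eq_none_iff] using hm) hFne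
      | some m => exact ⟨m, rfl⟩
    rw [hmv]
    simp only [Option.getD_some]
    -- B's result as a filter over R
    have hBfin : ((F.map (fun i => (i, pvCnt row i))).filter (fun p => p.2 == mv)).map Prod.fst
        = R.filter (fun i => free i && (pvCnt row i == mv)) := by
      rw [List.filter_map]
      simp only [List.map_map, Function.comp_def]
      rw [hF, List.filter_filter]
      simp [List.map_id']
      exact List.filter_congr fun x _ => by rw [Bool.and_comm]
    rw [hBfin]
    -- minimum facts
    obtain ⟨i0, hi0F, hi0v⟩ : ∃ i, i ∈ F ∧ pvCnt row i = mv := by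
      have := PySem.List.min?_mem hmv
      simpa using this
    have hmin : ∀ i ∈ F, mv ≤ pvCnt row i := by
      intro i hi
      have := PySem.List.min?_isMin hmv (pvCnt row i) (by simpa using ⟨i, hi, rfl⟩)
      simpa using this
    have hb := pvCnt_bounds row i0
    have hi0R : i0 ∈ R := (List.mem_filter.mp hi0F).1
    have hfree_i0 : free i0 = true := (List.mem_filter.mp hi0F).2
    have hlb : 0 ≤ mv := by omega
    have hub : mv ≤ 2 := by omega
    have hminF : ∀ x ∈ R, free x = true → mv ≤ pvCnt row x := by
      intro x hx hf
      exact hmin x (List.mem_filter.mpr ⟨hx, hf⟩)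
    interval_cases mv
    · -- minimum count 0: A returns its first pass
      have hmem : i0 ∈ R.filter (fun x => free x && (pvCnt row x == 0)) :=
        List.mem_filter.mpr ⟨hi0R, by simp [hfree_i0, hi0v]⟩
      rw [if_pos (List.length_pos_iff.mpr (List.ne_nil_of_mem hmem))]
    · -- minimum count 1: first pass empty, A returns its second pass
      have h1 : R.filter (fun x => free x && (pvCnt row x == 0)) = [] := by
        rw [List.filter_eq_nil_iff]
        intro x hx hcond
        simp only [Bool.and_eq_true, beq_iff_eq] at hcond
        have := hminF x hx hcond.1
        omega
      rw [h1]
      have hmem : i0 ∈ R.filter (fun x => free x && decide (pvCnt row x ≤ 1)) :=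
        List.mem_filter.mpr ⟨hi0R, by simp [hfree_i0, hi0v]⟩
      simp only [List.length_nil, gt_iff_lt, lt_self_iff_false, if_false]
      rw [if_pos (List.length_pos_iff.mpr (List.ne_nil_of_mem hmem))]
      apply List.filter_congr
      intro x hx
      by_cases hf : PySem.List.pyGetD row x 1 = 0
      · have h1c := hminF x hx (by simp [hfree, hf])
        by_cases hc : pvCnt row x = 1
        · simp [hfree, hf, hc]
        · have h2 : ¬ (pvCnt row x ≤ 1) := by omega
          simp [hfree, hf, hc, h2]
      · have hb0 : (PySem.List.pyGetD row x 1 == 0) = false := by simp [hf]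
        rw [hfree]
        simp only [hb0, Bool.false_and]
    · -- minimum count 2: first two passes empty, A returns all free seats
      have h1 : R.filter (fun x => free x && (pvCnt row x == 0)) = [] := by
        rw [List.filter_eq_nil_iff]
        intro x hx hcond
        simp only [Bool.and_eq_true, beq_iff_eq] at hcond
        have := hminF x hx hcond.1
        omega
      have h2 : R.filter (fun x => free x && decide (pvCnt row x ≤ 1)) = [] := by
        rw [List.filter_eq_nil_iff]
        intro x hx hcond
        simp only [Bool.and_eq_true, decide_eq_true_eq] at hcond
        have := hminF x hx hcond.1
        omega
      rw [h1, h2]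
      simp only [List.length_nil, gt_iff_lt, lt_self_iff_false, if_false]
      rw [hF]
      apply List.filter_congr
      intro x hx
      by_cases hf : PySem.List.pyGetD row x 1 = 0
      · have h1c := hminF x hx (by simp [hfree, hf])
        have h2c := pvCnt_bounds row x
        have hcx : pvCnt row x = 2 := by omega
        simp [hfree, hf, hcx]
      · have hb0 : (PySem.List.pyGetD row x 1 == 0) = false := by simp [hf]
        rw [hfree]
        simp only [hb0, Bool.false_and]

-- ===== VERDICT (by name: the statement is the Claim_ definition above) =====
theorem getValidSeats_spec : Claim_equal_getValidSeats := by
  intro row _ _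
  exact getValidSeats_main row
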